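-- pv_equiv track=rewrite | github.com/d13-l1t3/PoetryForYou | backend/app/service.py | _make_cloze
-- ===== SOURCE A (Python) =====
-- def _make_cloze(text: str, every_n: int = 6) -> str:
--     words = text.split()
--     if len(words) < 12:
--         every_n = 4
--     out = []
--     for i, w in enumerate(words):
--         if i != 0 and i % every_n == 0 and len(w) > 2:
--             out.append("____")
--         else:
--             out.append(w)
--     return " ".join(out)
-- ===== SOURCE B (Python) =====
-- def _make_cloze(text: str, every_n: int = 6) -> str:
--     words = text.split()
--     if len(words) < 12:
--         every_n = 4
--     pieces = [words[:every_n]]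
--     rest = words[every_n:]
--     while rest:
--         head, rest = rest[:every_n], rest[every_n:]
--         if len(head[0]) > 2:
--             head = ["____"] + head[1:]
--         pieces.append(head)
--     return " ".join(w for p in pieces for w in p)
-- ===== Notes on version B (the rewrite author's own statement) =====
-- stated objective: alternative
-- what changed: B consumes the word list block by block with a while loop (first block copied, each later block's first word blanked when longer than 2), instead of A's single indexed scan with a modulo test on every word.
import Mathlib
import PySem

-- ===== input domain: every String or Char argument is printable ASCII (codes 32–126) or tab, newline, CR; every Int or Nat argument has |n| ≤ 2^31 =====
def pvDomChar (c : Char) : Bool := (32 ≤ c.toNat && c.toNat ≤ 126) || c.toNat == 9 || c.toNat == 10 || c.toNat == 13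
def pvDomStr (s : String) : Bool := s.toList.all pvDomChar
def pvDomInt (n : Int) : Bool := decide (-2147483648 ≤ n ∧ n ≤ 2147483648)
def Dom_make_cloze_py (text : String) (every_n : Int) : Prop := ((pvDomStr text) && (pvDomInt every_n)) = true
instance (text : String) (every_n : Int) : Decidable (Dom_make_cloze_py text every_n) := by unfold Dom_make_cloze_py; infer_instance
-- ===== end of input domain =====

-- B consumes the word list block by block with a fuelled while-loop (first block copied, each
-- later block's first word blanked when longer than 2) instead of A's indexed scan with a
-- modulo test (objective: alternative).


-- ===== PORT A =====
def make_cloze_py (text : String) (every_n : Int) : String :=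
  let words := PySem.Str.split₀ text
  let n := if (words.length : Int) < 12 then 4 else every_n
  let out := (PySem.List.enumerate words).foldl
    (fun out iw =>
      if iw.1 ≠ 0 ∧ PySem.Int.mod iw.1 n = 0 ∧ 2 < PySem.Str.len iw.2 then
        out ++ ["____"]
      else
        out ++ [iw.2]) []
  PySem.Str.join " " out

-- ===== PORT B =====
-- Source B's while loop as a fuelled recursion (fuel = words.length; inside Pre_ the step is
-- positive, so rest strictly shrinks and the fuel always suffices).  On head = [] Python's
-- head[0] raises IndexError; that happens only for every_n ≤ 0, which Pre_ excludes.
def pvClozeLoop (fuel : Nat) (rest : List String) (n : Int) : List (List String) :=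
  match fuel with
  | 0 => []
  | fuel + 1 =>
    match rest with
    | [] => []
    | _ :: _ =>
      let head := PySem.List.slice rest none (some n)
      let rest' := PySem.List.slice rest (some n) none
      let head' :=
        match head with
        | [] => head
        | w :: tl => if 2 < PySem.Str.len w then "____" :: tl else w :: tl
      head' :: pvClozeLoop fuel rest' n

def make_cloze_py_alt (text : String) (every_n : Int) : String :=
  let words := PySem.Str.split₀ text
  let n := if (words.length : Int) < 12 then 4 else every_n
  let pieces := PySem.List.slice words none (some n) ::
      pvClozeLoop words.length (PySem.List.slice words (some n) none) n
  PySem.Str.join " " pieces.flatten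

-- ===== PRECONDITION & SPEC =====
-- Pre_ restricts every_n to the natural domain (a positive step) when it is actually used,
-- i.e. when the text has at least 12 words: there A raises ZeroDivisionError for every_n = 0,
-- and for negative every_n A's modulo test still fires on multiples of |every_n| while B's
-- block slicing raises IndexError — an accident of C-style modulo nobody would specify.
def Pre_make_cloze_py (text : String) (every_n : Int) : Prop :=
  12 ≤ (PySem.Str.split₀ text).length → 1 ≤ every_n
instance (text : String) (every_n : Int) : Decidable (Pre_make_cloze_py text every_n) := by
  unfold Pre_make_cloze_py; infer_instance

def pvWitness_make_cloze_py : String × Int :=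
  ("one two three four five six seven eight nine ten eleven twelve", 6)

def Spec_make_cloze_py (text : String) (every_n : Int) (out : String) : Prop := out = make_cloze_py_alt text every_n
instance (text : String) (every_n : Int) (out : String) : Decidable (Spec_make_cloze_py text every_n out) := by unfold Spec_make_cloze_py; infer_instance

-- ===== CLAIM (what is proved, stated in full; the proofs are below) =====
def Claim_equal_make_cloze_py : Prop := ∀ (text : String) (every_n : Int), Dom_make_cloze_py text every_n → Pre_make_cloze_py text every_n → Spec_make_cloze_py text every_n (make_cloze_py text every_n)

-- ===== LEMMAS AND PROOFS =====

-- the word produced for position i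
def pvBlank (n i : Int) (w : String) : String :=
  if i ≠ 0 ∧ PySem.Int.mod i n = 0 ∧ 2 < PySem.Str.len w then "____" else w

-- reference list for the part after the first block: local position p is blanked iff p % n = 0
def pvSpecB (n : Int) (p : Int) : List String → List String
  | [] => []
  | w :: tl => (if p % n = 0 ∧ 2 < PySem.Str.len w then "____" else w) :: pvSpecB n (p + 1) tl

-- A's loop of appends is a map over enumerate
theorem pvA_list_eq (words : List String) (n : Int) :
    (PySem.List.enumerate words).foldl
      (fun out iw =>
        if iw.1 ≠ 0 ∧ PySem.Int.mod iw.1 n = 0 ∧ 2 < PySem.Str.len iw.2 then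
          out ++ ["____"]
        else
          out ++ [iw.2]) [] =
    (PySem.List.enumerate words).map (fun iw => pvBlank n iw.1 iw.2) := by
  have h := PySem.List.foldl_append_eq_flatMap
      (fun iw : Int × String => [pvBlank n iw.1 iw.2])
      (PySem.List.enumerate words) []
  rw [show (fun (out : List String) (iw : Int × String) =>
        if iw.1 ≠ 0 ∧ PySem.Int.mod iw.1 n = 0 ∧ 2 < PySem.Str.len iw.2 then
          out ++ ["____"] else out ++ [iw.2]) =
      (fun (out : List String) (iw : Int × String) => out ++ [pvBlank n iw.1 iw.2])
      from by funext out iw; unfold pvBlank; split <;> simp_all]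
  rw [h, List.nil_append]
  exact List.map_eq_flatMap.symm

-- positions 1 ≤ p with the list ending before n are never blanked
theorem pvSpecB_skip (n : Int) :
    ∀ (l : List String) (p : Int), 1 ≤ p → p + l.length ≤ n → pvSpecB n p l = l := by
  intro l
  induction l with
  | nil => intro p _ _; rfl
  | cons w tl ih =>
    intro p hp hle
    push_cast [List.length_cons] at hle
    have hmod : p % n = p := Int.emod_eq_of_lt (by omega) (by omega)
    have hnot : ¬ (p % n = 0 ∧ 2 < PySem.Str.len w) := by rw [hmod]; rintro ⟨h0, -⟩; omega
    simp only [pvSpecB, if_neg hnot]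
    rw [ih (p + 1) (by omega) (by omega)]

theorem pvSpecB_append (n p : Int) (l₁ l₂ : List String) :
    pvSpecB n p (l₁ ++ l₂) = pvSpecB n p l₁ ++ pvSpecB n (p + l₁.length) l₂ := by
  induction l₁ generalizing p with
  | nil => simp [pvSpecB]
  | cons w tl ih =>
    simp only [List.cons_append, pvSpecB, ih, List.length_cons]
    congr 2
    push_cast
    ring_nf

theorem pvSpecB_period (n : Int) (l : List String) :
    ∀ p, pvSpecB n (p + n) l = pvSpecB n p l := by
  induction l with
  | nil => intro p; rfl
  | cons w tl ih =>
    intro p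
    simp only [pvSpecB, Int.add_emod_right]
    rw [show p + n + 1 = (p + 1) + n from by ring, ih]

-- flattening B's loop output gives the reference list
theorem pvLoop_flatten (n : Int) (hn : 1 ≤ n) :
    ∀ (fuel : Nat) (rest : List String), rest.length ≤ fuel →
      (pvClozeLoop fuel rest n).flatten = pvSpecB n 0 rest := by
  intro fuel
  induction fuel with
  | zero =>
    intro rest hle
    have : rest = [] := List.eq_nil_of_length_eq_zero (by omega)
    subst this; rfl
  | succ fuel ih =>
    intro rest hle
    match rest with
    | [] => rfl
    | w :: tl =>
      have hn0 : (0 : Int) ≤ n := by omega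
      have hslice_to : PySem.List.slice (w :: tl) none (some n) = (w :: tl).take n.toNat :=
        PySem.List.slice_to _ hn0
      have hslice_from : PySem.List.slice (w :: tl) (some n) none = (w :: tl).drop n.toNat :=
        PySem.List.slice_from _ hn0
      have hnt : 1 ≤ n.toNat := by omega
      have htake : (w :: tl).take n.toNat = w :: tl.take (n.toNat - 1) := by
        cases hnn : n.toNat with
        | zero => omega
        | succ m => simp
      have hdroplen : ((w :: tl).drop n.toNat).length ≤ fuel := by
        simp only [List.length_drop]
        simp only [List.length_cons] at hle ⊢
        omega
      simp only [pvClozeLoop, hslice_to, hslice_from, htake, List.flatten_cons]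
      rw [ih _ hdroplen]
      -- right-hand side: split rest at n.toNat
      conv_rhs => rw [show (w :: tl) = (w :: tl.take (n.toNat - 1)) ++ (w :: tl).drop n.toNat from by
        rw [← htake, List.take_append_drop]]
      rw [pvSpecB_append]
      congr 1
      · -- first block: only position 0 blanked
        have h0 : (0 : Int) % n = 0 := by simp
        simp only [pvSpecB, h0, true_and, zero_add]
        rw [pvSpecB_skip n _ 1 le_rfl (by
          have := List.length_take_le (n.toNat - 1) tl
          omega)]
        split <;> rfl
      · -- remaining blocks: the offset is a multiple of n
        cases hdrop : (w :: tl).drop n.toNat with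
        | nil => rfl
        | cons v vs =>
          have hlen : (w :: tl.take (n.toNat - 1)).length = n.toNat := by
            have hlt : n.toNat < (w :: tl).length := by
              by_contra hge
              rw [List.drop_eq_nil_of_le (by omega)] at hdrop
              simp at hdrop
            simp only [List.length_cons] at hlt ⊢
            rw [List.length_take]
            omega
          rw [hlen, ← hdrop,
            show (0 : Int) + (n.toNat : Int) = 0 + n from by omega, pvSpecB_period]

-- A's map over an enumerate segment lying inside the first block changes nothing
theorem pvA_first_block (n : Int) (hn : 1 ≤ n) :
    ∀ (l : List String) (s : Int), 0 ≤ s → s + l.length ≤ n →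
      (PySem.List.enumerate l s).map (fun iw => pvBlank n iw.1 iw.2) = l := by
  intro l
  induction l with
  | nil => intro s _ _; rfl
  | cons w tl ih =>
    intro s hs hle
    simp only [List.length_cons] at hle
    have hw : pvBlank n s w = w := by
      unfold pvBlank
      rcases eq_or_lt_of_le hs with h0 | h1
    -- s = 0: the i ≠ 0 conjunct fails; 1 ≤ s: s % n = s ≠ 0
      · rw [if_neg]; rintro ⟨hne, -⟩; exact hne h0.symm
      · rw [if_neg]
        rintro ⟨-, hmod, -⟩
        rw [PySem.Int.mod_eq_emod_of_pos (by omega),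
          Int.emod_eq_of_lt (by omega) (by omega)] at hmod
        omega
    rw [PySem.List.enumerate_cons, List.map_cons, hw,
      ih (s + 1) (by omega) (by omega)]

-- A's map over an enumerate segment starting at offset p + n is the reference list
theorem pvA_rest (n : Int) (hn : 1 ≤ n) :
    ∀ (l : List String) (p : Int), 0 ≤ p →
      (PySem.List.enumerate l (p + n)).map (fun iw => pvBlank n iw.1 iw.2) = pvSpecB n p l := by
  intro l
  induction l with
  | nil => intro p _; rfl
  | cons w tl ih =>
    intro p hp
    rw [PySem.List.enumerate_cons, List.map_cons,
      show p + n + 1 = (p + 1) + n from by ring, ih (p + 1) (by omega)]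
    simp only [pvSpecB]
    congr 1
    unfold pvBlank
    have hne : p + n ≠ 0 := by omega
    have hmod : PySem.Int.mod (p + n) n = p % n := by
      rw [PySem.Int.mod_eq_emod_of_pos (by omega), Int.add_emod_right]
    simp [hne, hmod]

-- the two output word lists agree for any positive effective step n
theorem pv_lists_eq (words : List String) (n : Int) (hn : 1 ≤ n) :
    (PySem.List.enumerate words).map (fun iw => pvBlank n iw.1 iw.2) =
    (PySem.List.slice words none (some n) ::
      pvClozeLoop words.length (PySem.List.slice words (some n) none) n).flatten := by
  have hn0 : (0 : Int) ≤ n := by omega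
  rw [List.flatten_cons, PySem.List.slice_to _ hn0, PySem.List.slice_from _ hn0,
    pvLoop_flatten n hn _ _ (by simp [List.length_drop])]
  conv_lhs => rw [← List.take_append_drop n.toNat words]
  rw [PySem.List.enumerate_append, List.map_append]
  congr 1
  · exact pvA_first_block n hn _ 0 le_rfl (by
      have := List.length_take_le n.toNat words
      omega)
  · cases hdrop : words.drop n.toNat with
    | nil => rfl
    | cons v vs =>
      have hlt : n.toNat < words.length := by
        by_contra hge
        rw [List.drop_eq_nil_of_le (by omega)] at hdrop
        simp at hdrop
      have hlen : (words.take n.toNat).length = n.toNat := by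
        rw [List.length_take]; omega
      rw [← hdrop, hlen, show (0 : Int) + (n.toNat : Int) = 0 + n from by omega]
      exact pvA_rest n hn _ 0 le_rfl

-- ===== VERDICT (by name: the statement is the Claim_ definition above) =====
theorem make_cloze_py_spec : Claim_equal_make_cloze_py := by
  intro text every_n _ hpre
  unfold Spec_make_cloze_py make_cloze_py make_cloze_py_alt
  dsimp only
  have hn : 1 ≤ (if ((PySem.Str.split₀ text).length : Int) < 12 then 4 else every_n) := by
    split
    · omega
    · exact hpre (by omega)
  rw [pvA_list_eq, pv_lists_eq _ _ hn]
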